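-- pv_equiv track=rewrite | github.com/nickgreenquist/cu2rec | preprocessing/map_netflix.py | sort_by_user
-- ===== SOURCE A (Python) =====
-- def sort_by_user(rows):
--     """Rows are sorted by item ids. Re-sort them by user ids instead
--     """
--     user_map = {}
--     for row in rows:
--         if row[0] in user_map:
--             user_map[row[0]].append(row)
--         else:
--             user_map[row[0]] = [row]
--     sorted_rows = []
--     for user_id in sorted(list(user_map)):
--         for row in user_map[user_id]:
--             sorted_rows.append(row)
--     return sorted_rows
-- ===== SOURCE B (Python) =====
-- def sort_by_user(rows):
--     """Rows are sorted by item ids. Re-sort them by user ids instead"""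
--     return sorted(rows, key=lambda r: r[0])
-- ===== Notes on version B (the rewrite author's own statement) =====
-- stated objective: simpler
-- what changed: Replaces the bucket-by-user dict plus sorted-key concatenation with a single stable sort keyed on the user id; Timsort's stability preserves the original order within each user group, so no grouping structure is built.
import Mathlib
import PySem

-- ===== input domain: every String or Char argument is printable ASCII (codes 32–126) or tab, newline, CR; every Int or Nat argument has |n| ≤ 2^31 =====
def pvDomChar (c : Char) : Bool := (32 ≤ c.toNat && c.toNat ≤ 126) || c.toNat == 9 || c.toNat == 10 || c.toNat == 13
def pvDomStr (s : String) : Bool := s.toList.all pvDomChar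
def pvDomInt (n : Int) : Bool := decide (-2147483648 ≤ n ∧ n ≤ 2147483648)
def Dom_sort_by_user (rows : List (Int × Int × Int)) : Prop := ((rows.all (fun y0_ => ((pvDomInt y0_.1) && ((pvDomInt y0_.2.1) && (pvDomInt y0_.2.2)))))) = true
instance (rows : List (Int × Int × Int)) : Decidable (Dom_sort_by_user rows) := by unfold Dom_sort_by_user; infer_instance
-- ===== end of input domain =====

-- B replaces A's per-user bucket dict + sorted-key concatenation by one stable sort keyed on the user id (objective: simpler).


-- ===== PORT A =====
def sort_by_user (rows : List (Int × Int × Int)) : List (Int × Int × Int) :=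
  let user_map : PySem.Dict Int (List (Int × Int × Int)) :=
    rows.foldl (fun d row =>
      if d.contains row.1 then d.modify row.1 [] (fun l => l ++ [row])
      else d.insert row.1 [row]) PySem.Dict.empty
  let sortedIds := PySem.List.sorted user_map.keys (fun x => x) false
  sortedIds.foldl (fun acc uid =>
    (user_map.getD uid []).foldl (fun a row => a ++ [row]) acc) []

-- ===== PORT B =====
def sort_by_user_alt (rows : List (Int × Int × Int)) : List (Int × Int × Int) :=
  PySem.List.sorted rows (fun r => r.1) false

-- ===== PRECONDITION & SPEC =====
def Spec_sort_by_user (rows : List (Int × Int × Int)) (out : List (Int × Int × Int)) : Prop := out = sort_by_user_alt rows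
instance (rows : List (Int × Int × Int)) (out : List (Int × Int × Int)) : Decidable (Spec_sort_by_user rows out) := by unfold Spec_sort_by_user; infer_instance

-- ===== CLAIM (what is proved, stated in full; the proofs are below) =====
def Claim_equal_sort_by_user : Prop := ∀ (rows : List (Int × Int × Int)), Dom_sort_by_user rows → Spec_sort_by_user rows (sort_by_user rows)

-- ===== LEMMAS AND PROOFS =====


theorem branch_eq_modify (d : PySem.Dict Int (List (Int × Int × Int))) (row : Int × Int × Int) :
    (if d.contains row.1 then d.modify row.1 [] (fun l => l ++ [row]) else d.insert row.1 [row])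
      = d.modify row.1 [] (fun l => l ++ [row]) := by
  split_ifs with h
  · rfl
  · show d.insert row.1 [row] = d.insert row.1 (d.getD row.1 [] ++ [row])
    have : d.getD row.1 [] = [] := by
      rw [PySem.Dict.getD_of_not_contains] ; simpa using h
    simp [this]

theorem getD_groupFold (l : List (Int × Int × Int)) (d : PySem.Dict Int (List (Int × Int × Int))) (c : Int) :
    (l.foldl (fun d row => d.modify row.1 [] (fun l => l ++ [row])) d).getD c []
      = d.getD c [] ++ l.filter (fun r => r.1 == c) := by
  induction l generalizing d with
  | nil => simp
  | cons r l ih =>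
    simp only [List.foldl_cons, ih, List.filter_cons]
    rw [PySem.Dict.getD_modify]
    by_cases h : r.1 = c
    · simp [h]
    · simp [h, Ne.symm h]

theorem keys_groupFold (l : List (Int × Int × Int)) :
    (l.foldl (fun d row => d.modify row.1 [] (fun l => l ++ [row]))
      (PySem.Dict.empty : PySem.Dict Int (List (Int × Int × Int)))).keys
      = PySem.Set.ofList (l.map (fun r => r.1)) := by
  rw [PySem.Dict.keys_foldl_modify_key]
  simp [PySem.Set.update_eq_append_filter, PySem.Dict.keys_empty, PySem.Set.contains]


theorem insertBy_pairwise (x : Int × Int × Int) (ys : List (Int × Int × Int))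
    (h : ys.Pairwise (fun a b => a.1 ≤ b.1)) :
    (PySem.List.insertBy (fun a b => decide (a.1 < b.1)) x ys).Pairwise (fun a b => a.1 ≤ b.1) := by
  induction ys with
  | nil => simp [PySem.List.insertBy]
  | cons y ys ih =>
    rw [List.pairwise_cons] at h
    show (if (decide (x.1 < y.1)) = true then x :: y :: ys else y :: PySem.List.insertBy _ x ys).Pairwise _
    split_ifs with hlt
    · simp only [decide_eq_true_eq] at hlt
      refine List.Pairwise.cons ?_ (List.Pairwise.cons h.1 h.2)
      intro b hb
      rcases List.mem_cons.mp hb with rfl | hb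
      · exact le_of_lt hlt
      · exact le_trans (le_of_lt hlt) (h.1 b hb)
    · simp only [decide_eq_true_eq, not_lt] at hlt
      refine List.Pairwise.cons ?_ (ih h.2)
      intro b hb
      rcases (PySem.List.mem_insertBy _ _ _ _).mp hb with rfl | hb
      · exact hlt
      · exact h.1 b hb

theorem insertBy_filter (x : Int × Int × Int) (ys : List (Int × Int × Int)) (k : Int)
    (h : ys.Pairwise (fun a b => a.1 ≤ b.1)) :
    (PySem.List.insertBy (fun a b => decide (a.1 < b.1)) x ys).filter (fun r => r.1 == k)
      = if x.1 = k then ys.filter (fun r => r.1 == k) ++ [x] else ys.filter (fun r => r.1 == k) := by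
  induction ys with
  | nil => by_cases hx : x.1 = k <;> simp [PySem.List.insertBy, hx]
  | cons y ys ih =>
    rw [List.pairwise_cons] at h
    show (if (decide (x.1 < y.1)) = true then x :: y :: ys else y :: PySem.List.insertBy _ x ys).filter _ = _
    by_cases hlt : x.1 < y.1
    · rw [if_pos (by simpa using hlt)]
      by_cases hx : x.1 = k
      · have hnil : (y :: ys).filter (fun r => r.1 == k) = [] := by
          rw [List.filter_eq_nil_iff]
          intro a ha
          rcases List.mem_cons.mp ha with rfl | ha
          · simp ; omega
          · have := h.1 a ha ; simp ; omega
        rw [List.filter_cons_of_pos (by simpa using hx), hnil, if_pos hx]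
        rfl
      · rw [List.filter_cons_of_neg (by simpa using hx), if_neg hx]
    · rw [if_neg (by simpa using hlt)]
      rw [List.filter_cons, ih h.2]
      by_cases hy : y.1 = k <;> by_cases hx : x.1 = k <;>
        simp [hx, hy]
theorem foldl_insertBy_filter (l : List (Int × Int × Int)) (acc : List (Int × Int × Int)) (k : Int)
    (h : acc.Pairwise (fun a b => a.1 ≤ b.1)) :
    (l.foldl (fun acc x => PySem.List.insertBy (fun a b => decide (a.1 < b.1)) x acc) acc).filter (fun r => r.1 == k)
      = acc.filter (fun r => r.1 == k) ++ l.filter (fun r => r.1 == k) := by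
  induction l generalizing acc with
  | nil => simp
  | cons x l ih =>
    rw [List.foldl_cons, ih _ (insertBy_pairwise x acc h), insertBy_filter x acc k h, List.filter_cons]
    by_cases hx : x.1 = k <;> simp [hx]

theorem sorted_filter_stable (rows : List (Int × Int × Int)) (k : Int) :
    (PySem.List.sorted rows (fun r => r.1) false).filter (fun r => r.1 == k)
      = rows.filter (fun r => r.1 == k) := by
  rw [PySem.List.sorted_eq_foldl_insertBy, foldl_insertBy_filter rows [] k (by simp)]
  simp

theorem eq_of_pairwise_filter : ∀ (ys zs : List (Int × Int × Int)),
    ys.Pairwise (fun a b => a.1 ≤ b.1) → zs.Pairwise (fun a b => a.1 ≤ b.1) →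
    (∀ k, ys.filter (fun r => r.1 == k) = zs.filter (fun r => r.1 == k)) → ys = zs := by
  intro ys
  induction ys with
  | nil =>
    intro zs _ _ hf
    cases zs with
    | nil => rfl
    | cons z zs =>
      have := hf z.1
      simp at this
  | cons y ys ih =>
    intro zs hy hz hf
    cases zs with
    | nil =>
      have := hf y.1
      simp at this
    | cons z zs =>
      rw [List.pairwise_cons] at hy hz
      -- first, the head keys agree
      have hkey : y.1 = z.1 := by
        by_contra hne
        rcases lt_or_gt_of_ne hne with hlt | hgt
        · -- y.1 < z.1 : filter at y.1 is (y :: …) on the left, [] on the right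
          have := hf y.1
          rw [List.filter_cons_of_pos (by simp)] at this
          have hnil : (z :: zs).filter (fun r => r.1 == y.1) = [] := by
            rw [List.filter_eq_nil_iff]
            intro a ha
            rcases List.mem_cons.mp ha with rfl | ha
            · simp ; omega
            · have := hz.1 a ha ; simp ; omega
          rw [hnil] at this
          exact absurd this (by simp)
        · have := hf z.1
          rw [List.filter_cons_of_neg (by simp ; omega)] at this
          have hnil : ys.filter (fun r => r.1 == z.1) = [] := by
            rw [List.filter_eq_nil_iff]
            intro a ha
            have := hy.1 a ha ; simp ; omega
          rw [hnil, List.filter_cons_of_pos (by simp)] at this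
          exact absurd this (by simp)
      -- then the heads agree and the tails satisfy the hypotheses
      have hhead := hf y.1
      rw [List.filter_cons_of_pos (by simp), List.filter_cons_of_pos (by simp [hkey])] at hhead
      have hyz : y = z := (List.cons.injEq _ _ _ _ ▸ hhead).1
      have htails : ∀ k, ys.filter (fun r => r.1 == k) = zs.filter (fun r => r.1 == k) := by
        intro k
        by_cases hk : y.1 = k
        · have := hf k
          rw [List.filter_cons_of_pos (by simp [hk]), List.filter_cons_of_pos (by simp [hkey ▸ hk])] at this
          exact (List.cons.injEq _ _ _ _ ▸ this).2
        · have := hf k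
          rwa [List.filter_cons_of_neg (by simpa using hk),
               List.filter_cons_of_neg (by simp ; omega)] at this
      rw [hyz, ih zs hy.2 hz.2 htails]

theorem flatMap_groups_pairwise (ks : List Int) (rows : List (Int × Int × Int))
    (h : ks.Pairwise (· < ·)) :
    (ks.flatMap (fun k => rows.filter (fun r => r.1 == k))).Pairwise (fun a b => a.1 ≤ b.1) := by
  induction ks with
  | nil => simp
  | cons k ks ih =>
    rw [List.pairwise_cons] at h
    rw [List.flatMap_cons, List.pairwise_append]
    refine ⟨?_, ih h.2, ?_⟩
    · apply List.pairwise_of_forall_mem_list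
      intro a ha b hb
      have ha := (List.of_mem_filter ha)
      have hb := (List.of_mem_filter hb)
      simp at ha hb ; omega
    · intro a ha b hb
      have ha := (List.of_mem_filter ha)
      rcases List.mem_flatMap.mp hb with ⟨k', hk', hb⟩
      have hb := (List.of_mem_filter hb)
      have := h.1 k' hk'
      simp at ha hb ; omega

theorem flatMap_if (k0 : Int) (v : List (Int × Int × Int)) : ∀ (ks : List Int), ks.Nodup →
    ks.flatMap (fun k => if k = k0 then v else []) = if k0 ∈ ks then v else [] := by
  intro ks
  induction ks with
  | nil => simp
  | cons k ks ih =>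
    intro hnd
    rw [List.nodup_cons] at hnd
    rw [List.flatMap_cons, ih hnd.2]
    by_cases hk : k = k0
    · subst hk
      simp [hnd.1]
    · by_cases hmem : k0 ∈ ks <;> simp [hk, hmem, Ne.symm hk]

theorem flatMap_groups_filter (ks : List Int) (rows : List (Int × Int × Int)) (k0 : Int)
    (hnd : ks.Nodup) (hcov : ∀ r ∈ rows, r.1 ∈ ks) :
    (ks.flatMap (fun k => rows.filter (fun r => r.1 == k))).filter (fun r => r.1 == k0)
      = rows.filter (fun r => r.1 == k0) := by
  rw [List.filter_flatMap]
  have hterm : ∀ k, (rows.filter (fun r => r.1 == k)).filter (fun r => r.1 == k0)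
      = if k = k0 then rows.filter (fun r => r.1 == k0) else [] := by
    intro k
    by_cases hk : k = k0
    · subst hk ; rw [List.filter_filter] ; simp
    · rw [if_neg hk, List.filter_eq_nil_iff]
      intro a ha
      have h1 := List.mem_filter.mp ha
      simp at h1 ⊢ ; omega
  simp only [hterm]
  rw [flatMap_if k0 _ ks hnd]
  by_cases hmem : k0 ∈ ks
  · rw [if_pos hmem]
  · rw [if_neg hmem, eq_comm, List.filter_eq_nil_iff]
    intro a ha
    have := hcov a ha
    simp
    intro hk0 ; subst hk0 ; exact hmem this

theorem foldl_push {α : Type} (l : List α) (acc : List α) :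
    l.foldl (fun a x => a ++ [x]) acc = acc ++ l := by
  induction l generalizing acc with
  | nil => simp
  | cons x l ih => simp [List.foldl, ih]

theorem main_eq (rows : List (Int × Int × Int)) : sort_by_user rows = sort_by_user_alt rows := by
  unfold sort_by_user sort_by_user_alt
  have hbranch : (fun (d : PySem.Dict Int (List (Int × Int × Int))) (row : Int × Int × Int) =>
      if d.contains row.1 then d.modify row.1 [] (fun l => l ++ [row]) else d.insert row.1 [row])
      = fun d row => d.modify row.1 [] (fun l => l ++ [row]) := by
    funext d row ; exact branch_eq_modify d row
  rw [hbranch]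
  set um := rows.foldl (fun d row => d.modify row.1 [] (fun l => l ++ [row])) PySem.Dict.empty with hum
  have hkeys : um.keys = PySem.Set.ofList (rows.map (fun r => r.1)) := keys_groupFold rows
  have hgetD : ∀ c, um.getD c [] = rows.filter (fun r => r.1 == c) := by
    intro c ; rw [hum, getD_groupFold] ; simp
  set ks := PySem.List.sorted um.keys (fun x => x) false with hks
  have hlt : ks.Pairwise (· < ·) := by
    rw [hks, hkeys] ; exact PySem.List.sorted_ofList_pairwise_lt _
  -- flatten the two appending loops
  have hflat : ks.foldl (fun acc uid => (um.getD uid []).foldl (fun a row => a ++ [row]) acc) []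
      = ks.flatMap (fun k => rows.filter (fun r => r.1 == k)) := by
    calc ks.foldl (fun acc uid => (um.getD uid []).foldl (fun a row => a ++ [row]) acc) []
        = ks.foldl (fun acc uid => acc ++ um.getD uid []) [] := by
          simp only [foldl_push]
      _ = [] ++ ks.flatMap (fun uid => um.getD uid []) := PySem.List.foldl_append_eq_flatMap _ _ _
      _ = ks.flatMap (fun k => rows.filter (fun r => r.1 == k)) := by
          simp only [List.nil_append]
          exact List.flatMap_congr (fun k _ => hgetD k)
  rw [hflat]
  have hcov : ∀ r ∈ rows, r.1 ∈ ks := by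
    intro r hr
    rw [hks, PySem.List.mem_sorted, hkeys, PySem.Set.mem_ofList]
    exact List.mem_map.mpr ⟨r, hr, rfl⟩
  refine (eq_of_pairwise_filter (PySem.List.sorted rows (fun r => r.1) false)
    (ks.flatMap (fun k => rows.filter (fun r => r.1 == k)))
    (PySem.List.sorted_pairwise _ _) (flatMap_groups_pairwise ks rows hlt) ?_).symm
  intro k
  rw [sorted_filter_stable]
  exact (flatMap_groups_filter ks rows k (hlt.imp (fun h => ne_of_lt h)) hcov).symm

-- ===== VERDICT (by name: the statement is the Claim_ definition above) =====
theorem sort_by_user_spec : Claim_equal_sort_by_user := by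
  intro rows _
  unfold Spec_sort_by_user
  exact main_eq rows
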